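-- pv_equiv track=rewrite | github.com/ahdavies6/NLP_QA | text_analyzer.py | get_contiguous_x_phrases
-- ===== SOURCE A (Python) =====
-- def restring(sentence):
--     restring = []
--     for word in sentence:
--         restring.append(word[0])
--
--     return ' '.join(restring)
--
-- def get_contiguous_x_phrases(tagged_sentence, tag):
--     x_phrases = []
--     x_words = []
--     for word in tagged_sentence:
--         if word[1] == tag:
--             x_words.append(word)
--         elif len(x_words) > 0:
--             x_phrases.append(restring(x_words))
--             x_words.clear()
--     if len(x_words) > 0:
--         x_phrases.append(restring(x_words))
--         x_words.clear()
--
--     return x_phrases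
-- ===== SOURCE B (Python) =====
-- def get_contiguous_x_phrases(tagged_sentence, tag):
--     n = len(tagged_sentence)
--     match = [w[1] == tag for w in tagged_sentence]
--     starts = [i for i in range(n) if match[i] and (i == 0 or not match[i - 1])]
--     ends = [i + 1 for i in range(n) if match[i] and (i == n - 1 or not match[i + 1])]
--     return [' '.join(w[0] for w in tagged_sentence[s:e]) for s, e in zip(starts, ends)]
-- ===== Notes on version B (the rewrite author's own statement) =====
-- stated objective: alternative
-- what changed: Instead of a single accumulate-and-flush pass with a word buffer, B computes a boolean match mask, extracts the index lists of run starts and run ends by boundary tests on the mask, zips them and builds each phrase by slicing the sentence.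
import Mathlib
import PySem

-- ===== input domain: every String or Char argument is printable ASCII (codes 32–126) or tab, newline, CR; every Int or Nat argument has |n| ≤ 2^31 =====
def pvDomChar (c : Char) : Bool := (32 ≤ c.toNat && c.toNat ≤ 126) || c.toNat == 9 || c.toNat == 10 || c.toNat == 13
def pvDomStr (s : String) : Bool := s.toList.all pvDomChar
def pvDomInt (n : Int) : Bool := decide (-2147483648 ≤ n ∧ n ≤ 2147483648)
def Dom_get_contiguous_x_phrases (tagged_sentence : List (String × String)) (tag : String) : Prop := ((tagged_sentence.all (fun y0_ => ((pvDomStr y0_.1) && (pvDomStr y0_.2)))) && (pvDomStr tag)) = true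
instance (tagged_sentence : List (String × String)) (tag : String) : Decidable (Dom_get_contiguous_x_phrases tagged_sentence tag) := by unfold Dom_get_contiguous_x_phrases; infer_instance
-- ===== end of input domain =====

-- B replaces A's accumulate-and-flush buffer pass by a staged computation: a boolean
-- match mask, index lists of run starts and run ends, then zip-and-slice. Alternative
-- decomposition, same O(n) cost.

-- ===== PORT A =====
-- restring: ' '.join of a list built by appending each word's first component
def restringA (sentence : List (String × String)) : String :=
  PySem.Str.join " " (sentence.foldl (fun acc w => acc ++ [w.1]) [])

-- one iteration of A's loop body
def stepA (tag : String) (st : List String × List (String × String)) (word : String × String) :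
    List String × List (String × String) :=
  if word.2 == tag then (st.1, st.2 ++ [word])
  else if st.2.length > 0 then (st.1 ++ [restringA st.2], [])
  else st

-- A's post-loop flush
def finishA (st : List String × List (String × String)) : List String :=
  if st.2.length > 0 then st.1 ++ [restringA st.2] else st.1

def get_contiguous_x_phrases (tagged_sentence : List (String × String)) (tag : String) : List String :=
  finishA (tagged_sentence.foldl (stepA tag) ([], []))

-- ===== PORT B =====
-- n = len(tagged_sentence); match = [w[1] == tag for w in tagged_sentence];
-- starts = run-start indices, ends = run-end indices + 1; then zip and slice.
def get_contiguous_x_phrases_alt (tagged_sentence : List (String × String)) (tag : String) : List String :=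
  let n : Int := tagged_sentence.length
  let mtch : List Bool := tagged_sentence.map (fun w => w.2 == tag)
  let starts : List Int := (PySem.List.pyRange 0 n 1).filter (fun i =>
      ((PySem.List.pyGet? mtch i).getD false) &&
        (i == 0 || !((PySem.List.pyGet? mtch (i - 1)).getD false)))
  let ends : List Int := ((PySem.List.pyRange 0 n 1).filter (fun i =>
      ((PySem.List.pyGet? mtch i).getD false) &&
        (i == n - 1 || !((PySem.List.pyGet? mtch (i + 1)).getD false)))).map (· + 1)
  (starts.zip ends).map (fun p =>
      PySem.Str.join " " ((PySem.List.slice tagged_sentence (some p.1) (some p.2)).map Prod.fst))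

-- ===== PRECONDITION & SPEC =====
def Spec_get_contiguous_x_phrases (tagged_sentence : List (String × String)) (tag : String) (out : List String) : Prop := out = get_contiguous_x_phrases_alt tagged_sentence tag
instance (tagged_sentence : List (String × String)) (tag : String) (out : List String) : Decidable (Spec_get_contiguous_x_phrases tagged_sentence tag out) := by unfold Spec_get_contiguous_x_phrases; infer_instance

-- ===== CLAIM (what is proved, stated in full; the proofs are below) =====
def Claim_equal_get_contiguous_x_phrases : Prop := ∀ (tagged_sentence : List (String × String)) (tag : String), Dom_get_contiguous_x_phrases tagged_sentence tag → Spec_get_contiguous_x_phrases tagged_sentence tag (get_contiguous_x_phrases tagged_sentence tag)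

-- ===== LEMMAS AND PROOFS =====

-- reference function: recursion on the run structure, the common target of both proofs
def G (tag : String) : List (String × String) → List String
  | [] => []
  | w :: rest =>
    if w.2 == tag then
      PySem.Str.join " " ((w :: rest.takeWhile (fun r => r.2 == tag)).map Prod.fst)
        :: G tag (rest.dropWhile (fun r => r.2 == tag))
    else G tag rest
termination_by l => l.length
decreasing_by
  · exact Nat.lt_succ_of_le (List.length_dropWhile_le _ _)
  · exact Nat.lt_succ_self _

-- the match mask, read at a natural index (false past the end)
def mAt (tag : String) (ts : List (String × String)) (k : Nat) : Bool :=
  (ts.map (fun w => w.2 == tag)).getD k false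

-- natural-index forms of B's two filter predicates
def condS (tag : String) (ts : List (String × String)) (prev : Bool) (k : Nat) : Bool :=
  mAt tag ts k && (if k = 0 then !prev else !mAt tag ts (k - 1))

def condE (tag : String) (ts : List (String × String)) (k : Nat) : Bool :=
  mAt tag ts k && (decide (k = ts.length - 1) || !mAt tag ts (k + 1))

-- run-start indices (prev = does the element before the list match)
def S (tag : String) (prev : Bool) : List (String × String) → List Nat
  | [] => []
  | w :: rest =>
    (if (w.2 == tag) && !prev then [0] else []) ++ (S tag (w.2 == tag) rest).map (· + 1)

-- does the list start with a matching word
def nextM (tag : String) : List (String × String) → Bool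
  | [] => false
  | r :: _ => r.2 == tag

-- run-end indices
def E (tag : String) : List (String × String) → List Nat
  | [] => []
  | w :: rest =>
    (if (w.2 == tag) && !nextM tag rest then [0] else []) ++ (E tag rest).map (· + 1)

-- the phrase obtained from a (start, end) pair of natural indices
def phr (ts : List (String × String)) (p : Nat × Nat) : String :=
  PySem.Str.join " " (((ts.drop p.1).take (p.2 - p.1)).map Prod.fst)

theorem S_cons (tag : String) (w : String × String) (rest : List (String × String)) (prev : Bool) :
    S tag prev (w :: rest)
      = (if (w.2 == tag) && !prev then [0] else []) ++ (S tag (w.2 == tag) rest).map (· + 1) := rfl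

theorem E_cons (tag : String) (w : String × String) (rest : List (String × String)) :
    E tag (w :: rest)
      = (if (w.2 == tag) && !nextM tag rest then [0] else []) ++ (E tag rest).map (· + 1) := rfl

theorem map_add_shift (l : List Nat) (a b : Nat) :
    (l.map (· + a)).map (· + b) = l.map (· + (a + b)) := by
  rw [List.map_map]; congr 1; funext v; simp [Function.comp]; omega

theorem zip_shift (l1 l2 : List Nat) (c : Nat) :
    (l1.map (· + c)).zip (l2.map (· + (c + 1)))
      = (l1.zip (l2.map (· + 1))).map (Prod.map (· + c) (· + c)) := by
  rw [List.zip_map, List.zip_map_right, List.map_map]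
  congr 1
  funext p
  obtain ⟨x, y⟩ := p
  have : y + (c + 1) = y + 1 + c := by omega
  simp [Prod.map, this]

theorem phr_append (l ts : List (String × String)) (s e : Nat) :
    phr (l ++ ts) (s + l.length, e + l.length) = phr ts (s, e) := by
  simp only [phr]
  rw [Nat.add_comm s l.length, List.drop_length_add_append,
    show e + l.length - (l.length + s) = e - s by omega]

theorem mAt_cons_succ (tag : String) (w : String × String) (rest : List (String × String)) (k : Nat) :
    mAt tag (w :: rest) (k + 1) = mAt tag rest k := by
  simp [mAt]

theorem condS_cons (tag : String) (w : String × String) (rest : List (String × String))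
    (prev : Bool) (k : Nat) :
    condS tag (w :: rest) prev (k + 1) = condS tag rest (w.2 == tag) k := by
  cases k with
  | zero => simp [condS, mAt]
  | succ k => simp [condS, mAt_cons_succ]

theorem condE_cons (tag : String) (w : String × String) (rest : List (String × String)) (k : Nat) :
    condE tag (w :: rest) (k + 1) = condE tag rest k := by
  cases rest with
  | nil => simp [condE, mAt]
  | cons r rs =>
    simp only [condE, mAt_cons_succ, List.length_cons,
      show (k + 1 = rs.length + 1 + 1 - 1) ↔ (k = rs.length + 1 - 1) by omega]
    rfl

theorem filter_range_condS (tag : String) :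
    ∀ (ts : List (String × String)) (prev : Bool),
      (List.range ts.length).filter (condS tag ts prev) = S tag prev ts
  | [], _ => rfl
  | w :: rest, prev => by
    rw [List.length_cons, List.range_succ_eq_map, List.filter_cons, List.filter_map]
    have hc : (condS tag (w :: rest) prev) ∘ Nat.succ = condS tag rest (w.2 == tag) := by
      funext k; simp [Function.comp, condS_cons]
    rw [hc, filter_range_condS tag rest (w.2 == tag)]
    have h0 : condS tag (w :: rest) prev 0 = ((w.2 == tag) && !prev) := by
      simp [condS, mAt]
    rw [h0]
    simp only [S]
    split <;> simp

theorem filter_range_condE (tag : String) :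
    ∀ (ts : List (String × String)),
      (List.range ts.length).filter (condE tag ts) = E tag ts
  | [] => rfl
  | w :: rest => by
    rw [List.length_cons, List.range_succ_eq_map, List.filter_cons, List.filter_map]
    have hc : (condE tag (w :: rest)) ∘ Nat.succ = condE tag rest := by
      funext k; simp [Function.comp, condE_cons]
    rw [hc, filter_range_condE tag rest]
    have h0 : condE tag (w :: rest) 0 = ((w.2 == tag) && !nextM tag rest) := by
      cases rest with
      | nil => simp [condE, mAt, nextM]
      | cons r rs => simp [condE, mAt, nextM]
    rw [h0]
    simp only [E]
    split <;> simp

-- S with prev = true skips the leading run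
theorem S_true (tag : String) : ∀ (rest : List (String × String)),
    S tag true rest
      = (S tag false (rest.dropWhile (fun r => r.2 == tag))).map
          (· + (rest.takeWhile (fun r => r.2 == tag)).length)
  | [] => rfl
  | r :: rs => by
    by_cases h : (r.2 == tag) = true
    · rw [List.takeWhile_cons_of_pos (by simpa using h),
        List.dropWhile_cons_of_pos (by simpa using h), List.length_cons]
      rw [S_cons, h]
      simp only [Bool.not_true, Bool.and_false, Bool.false_eq_true, if_false, List.nil_append]
      rw [S_true tag rs, map_add_shift]
    · have h' : (r.2 == tag) = false := by simpa using h
      rw [List.takeWhile_cons_of_neg (by simpa using h), List.dropWhile_cons_of_neg (by simpa using h)]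
      rw [S_cons, h', S_cons, h']
      simp

-- E of a list whose head matches: one end at the end of the leading run, the rest shifted
theorem E_cons_match (tag : String) : ∀ (rest : List (String × String)) (w : String × String),
    (w.2 == tag) = true →
    E tag (w :: rest)
      = (rest.takeWhile (fun r => r.2 == tag)).length
          :: (E tag (rest.dropWhile (fun r => r.2 == tag))).map
               (· + ((rest.takeWhile (fun r => r.2 == tag)).length + 1))
  | [], w, hw => by simp [E, hw, nextM]
  | r :: rs, w, hw => by
    by_cases h : (r.2 == tag) = true
    · rw [List.takeWhile_cons_of_pos (by simpa using h),
        List.dropWhile_cons_of_pos (by simpa using h), List.length_cons]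
      rw [E_cons, show nextM tag (r :: rs) = true from by simp [nextM, h], hw]
      simp only [Bool.not_true, Bool.and_false, Bool.false_eq_true, if_false, List.nil_append]
      rw [E_cons_match tag rs r h, List.map_cons, map_add_shift]
    · have h' : (r.2 == tag) = false := by simpa using h
      rw [List.takeWhile_cons_of_neg (by simpa using h),
        List.dropWhile_cons_of_neg (by simpa using h), List.length_nil]
      rw [E_cons, show nextM tag (r :: rs) = false from by simp [nextM, h'], hw]
      simp

theorem phr_shift (ts : List (String × String)) (w : String × String) (s e : Nat) :
    phr (w :: ts) (s + 1, e + 1) = phr ts (s, e) := by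
  simp [phr, Nat.succ_sub_succ]

-- the zip of start/end indices, sliced, is exactly the run recursion G
theorem zip_SE_eq_G (tag : String) : ∀ (ts : List (String × String)),
    ((S tag false ts).zip ((E tag ts).map (· + 1))).map (phr ts) = G tag ts
  | [] => by simp [S, E, G]
  | w :: rest => by
    by_cases h : (w.2 == tag) = true
    · -- run head
      have hS : S tag false (w :: rest)
          = 0 :: (S tag false (rest.dropWhile (fun r => r.2 == tag))).map
              (· + ((rest.takeWhile (fun r => r.2 == tag)).length + 1)) := by
        rw [S_cons, h]
        simp only [Bool.not_false, Bool.and_true, if_true, List.singleton_append]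
        rw [S_true tag rest, map_add_shift]
      set k := (rest.takeWhile (fun r => r.2 == tag)).length with hk
      have hE : (E tag (w :: rest)).map (· + 1)
          = (k + 1) :: (E tag (rest.dropWhile (fun r => r.2 == tag))).map (· + ((k + 1) + 1)) := by
        rw [E_cons_match tag rest w h, List.map_cons, map_add_shift]
      rw [hS, hE, List.zip_cons_cons, List.map_cons, zip_shift, List.map_map]
      have hphr : (phr (w :: rest)) ∘ (Prod.map (· + (k+1)) (· + (k+1)))
          = phr (rest.dropWhile (fun r => r.2 == tag)) := by
        funext p
        obtain ⟨s, e⟩ := p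
        show phr (w :: rest) (s + (k + 1), e + (k + 1))
          = phr (rest.dropWhile (fun r => r.2 == tag)) (s, e)
        have h2 := phr_append (w :: rest.takeWhile (fun r => r.2 == tag))
          (rest.dropWhile (fun r => r.2 == tag)) s e
        simp only [List.cons_append, List.takeWhile_append_dropWhile, List.length_cons,
          ← hk] at h2
        exact h2
      rw [hphr, zip_SE_eq_G tag (rest.dropWhile (fun r => r.2 == tag))]
      have hhead : phr (w :: rest) (0, k + 1)
          = PySem.Str.join " " ((w :: rest.takeWhile (fun r => r.2 == tag)).map Prod.fst) := by
        simp only [phr, List.drop_zero, Nat.sub_zero, List.take_succ_cons]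
        congr 3
        conv_lhs => rw [← List.takeWhile_append_dropWhile (p := fun r => r.2 == tag) (l := rest)]
        exact List.take_left' rfl
      rw [hhead]
      simp [G, h]
    · -- non-matching head: everything shifts by one
      have h' : (w.2 == tag) = false := by simpa using h
      have hS : S tag false (w :: rest) = (S tag false rest).map (· + 1) := by
        simp [S, h']
      have hE : (E tag (w :: rest)).map (· + 1) = ((E tag rest).map (· + 1)).map (· + 1) := by
        simp [E, h', nextM, List.map_map]
      rw [hS, hE, List.zip_map, List.map_map]
      have hphr : (phr (w :: rest)) ∘ (Prod.map (· + 1) (· + 1)) = phr rest := by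
        funext p; obtain ⟨s, e⟩ := p
        exact phr_shift rest w s e
      rw [hphr, zip_SE_eq_G tag rest]
      simp [G, h']
termination_by ts => ts.length
decreasing_by
  · exact Nat.lt_succ_of_le (List.length_dropWhile_le _ _)
  · exact Nat.lt_succ_self _

-- ---- bridging B's port (Int indices, pyRange/pyGet?/slice) to the natural-index form ----

theorem alt_eq_zip (ts : List (String × String)) (tag : String) :
    get_contiguous_x_phrases_alt ts tag
      = ((S tag false ts).zip ((E tag ts).map (· + 1))).map (phr ts) := by
  unfold get_contiguous_x_phrases_alt
  simp only []
  rw [PySem.List.pyRange_one]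
  simp only [Int.sub_zero, Int.toNat_natCast]
  rw [List.filter_map, List.filter_map]
  have hS : (List.range ts.length).filter
      ((fun i => ((PySem.List.pyGet? (ts.map (fun w => w.2 == tag)) i).getD false) &&
        (i == 0 || !((PySem.List.pyGet? (ts.map (fun w => w.2 == tag)) (i - 1)).getD false)))
        ∘ (fun k : Nat => (0 : Int) + k))
      = (List.range ts.length).filter (condS tag ts false) := by
    apply List.filter_congr
    intro k hk
    have hk' : k < ts.length := List.mem_range.mp hk
    simp only [Function.comp, Int.zero_add]
    cases k with
    | zero =>
      simp [condS, mAt, PySem.List.pyGet?_zero, List.getD_eq_getElem?_getD,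
        List.getElem?_map]
    | succ k =>
      have h1 : ((k + 1 : Nat) : Int) - 1 = (k : Int) := by push_cast; ring
      simp only [h1, PySem.List.pyGet?_natCast]
      have h2 : (((k : Nat) : Int) + 1 == 0) = false := by
        simp only [beq_eq_false_iff_ne]; omega
      simp [condS, mAt, List.getD_eq_getElem?_getD, h2]
  have hE : (List.range ts.length).filter
      ((fun i => ((PySem.List.pyGet? (ts.map (fun w => w.2 == tag)) i).getD false) &&
        (i == (ts.length : Int) - 1 || !((PySem.List.pyGet? (ts.map (fun w => w.2 == tag)) (i + 1)).getD false)))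
        ∘ (fun k : Nat => (0 : Int) + k))
      = (List.range ts.length).filter (condE tag ts) := by
    apply List.filter_congr
    intro k hk
    have hk' : k < ts.length := List.mem_range.mp hk
    simp only [Function.comp, Int.zero_add]
    have h1 : ((k : Int) + 1) = ((k + 1 : Nat) : Int) := by push_cast; ring
    have h2 : ((k : Int) == (ts.length : Int) - 1) = decide (k = ts.length - 1) := by
      by_cases h : k = ts.length - 1
      · simp [h]; omega
      · simp [h]; omega
    rw [h1, h2]
    simp only [PySem.List.pyGet?_natCast, condE, mAt]
    by_cases h3 : k + 1 < ts.length
    · simp [List.getD_eq_getElem?_getD, List.getElem?_map]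
    · have : ts.length ≤ k + 1 := by omega
      simp [List.getD_eq_getElem?_getD,
        List.getElem?_eq_none (l := ts.map fun w => w.2 == tag) (by simpa using this)]
  rw [hS, hE, filter_range_condS, filter_range_condE]
  rw [List.map_map, List.zip_map, List.zip_map_right, List.map_map, List.map_map]
  congr 1
  funext p
  obtain ⟨s, e⟩ := p
  simp only [Function.comp_apply, Prod.map_apply, id_eq, Int.zero_add]
  rw [show ((e : Int) + 1) = ((e + 1 : Nat) : Int) by push_cast; ring,
    PySem.List.slice_natCast]
  rfl

-- ---- A's loop invariant, against G ----

theorem restringA_eq (s : List (String × String)) :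
    restringA s = PySem.Str.join " " (s.map Prod.fst) := by
  unfold restringA
  congr 1
  induction s using List.reverseRecOn with
  | nil => rfl
  | append_singleton xs x ih => simp [ih]

theorem loop_inv (tag : String) : ∀ (ts : List (String × String))
    (phrases : List String) (buf : List (String × String)),
    finishA (ts.foldl (stepA tag) (phrases, buf))
    = phrases ++ (if buf.isEmpty then G tag ts
        else PySem.Str.join " " ((buf ++ ts.takeWhile (fun r => r.2 == tag)).map Prod.fst) ::
             G tag (ts.dropWhile (fun r => r.2 == tag)))
  | [], phrases, buf => by
    cases buf with
    | nil => simp [finishA, G]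
    | cons b bs => simp [finishA, restringA_eq, G]
  | w :: rest, phrases, buf => by
    by_cases h : (w.2 == tag) = true
    · rw [List.foldl_cons, show stepA tag (phrases, buf) w = (phrases, buf ++ [w]) by
        simp [stepA, h]]
      rw [loop_inv tag rest phrases (buf ++ [w])]
      cases buf with
      | nil => simp [G, h]
      | cons b bs => simp [h]
    · have h' : (w.2 == tag) = false := by simpa using h
      cases buf with
      | nil =>
        rw [List.foldl_cons, show stepA tag (phrases, []) w = (phrases, []) by
          simp [stepA, h']]
        rw [loop_inv tag rest phrases []]
        simp [G, h']
      | cons b bs =>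
        rw [List.foldl_cons, show stepA tag (phrases, b :: bs) w
            = (phrases ++ [restringA (b :: bs)], []) by simp [stepA, h']]
        rw [loop_inv tag rest (phrases ++ [restringA (b :: bs)]) []]
        simp [G, h', restringA_eq]

-- ===== VERDICT (by name: the statement is the Claim_ definition above) =====
theorem get_contiguous_x_phrases_spec : Claim_equal_get_contiguous_x_phrases := by
  intro ts tag _
  unfold Spec_get_contiguous_x_phrases get_contiguous_x_phrases
  rw [alt_eq_zip, zip_SE_eq_G]
  simpa using loop_inv tag ts [] []
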